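-- pv_equiv track=rewrite | github.com/Ani-Razm/GOA | level 023/homework/homework.py | longest_shortest
-- ===== SOURCE A (Python) =====
-- def longest_shortest(nums):
--     shortest = nums[0]
--     longest = nums[0]
--     for i in nums:
--         if len(i) > len(longest):
--             longest = i
--         elif len(i) < len(shortest):
--             shortest = i
--     return longest, shortest
-- ===== SOURCE B (Python) =====
-- def longest_shortest(nums):
--     if len(nums) == 1:
--         return nums[0], nums[0]
--     mid = len(nums) // 2
--     l1, s1 = longest_shortest(nums[:mid])
--     l2, s2 = longest_shortest(nums[mid:])
--     longest = l1 if len(l1) >= len(l2) else l2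
--     shortest = s1 if len(s1) <= len(s2) else s2
--     return longest, shortest
-- ===== Notes on version B (the rewrite author's own statement) =====
-- stated objective: alternative
-- what changed: Replaces the single accumulator loop with a divide-and-conquer tournament: split the list in half, recurse on each half, and combine the two (longest, shortest) pairs with left-biased ties so the earliest extremal element still wins.
import Mathlib
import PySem

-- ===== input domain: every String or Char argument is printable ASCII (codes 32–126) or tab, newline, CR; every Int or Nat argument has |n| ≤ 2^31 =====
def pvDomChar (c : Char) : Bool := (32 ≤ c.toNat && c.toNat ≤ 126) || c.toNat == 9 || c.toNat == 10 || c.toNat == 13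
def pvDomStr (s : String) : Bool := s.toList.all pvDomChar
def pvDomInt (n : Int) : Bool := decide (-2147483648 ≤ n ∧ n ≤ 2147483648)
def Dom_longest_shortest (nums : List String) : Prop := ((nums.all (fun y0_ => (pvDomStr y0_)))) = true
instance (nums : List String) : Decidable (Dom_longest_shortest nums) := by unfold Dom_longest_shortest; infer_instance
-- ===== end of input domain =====

-- B replaces A's single accumulator loop with a divide-and-conquer tournament (split in half, combine with left-biased ties); alternative decomposition, equivalence of RETURN values proved for nonempty input.


-- ===== PORT A =====
-- A: shortest = longest = nums[0]; one loop with strict comparisons updating each accumulator.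
def longest_shortest (nums : List String) : String × String :=
  match nums with
  | [] => ("", "")  -- unreachable: nums[0] raises IndexError, excluded by Pre_
  | h :: _ =>
    nums.foldl
      (fun (p : String × String) i =>
        if PySem.Str.len i > PySem.Str.len p.1 then (i, p.2)
        else if PySem.Str.len i < PySem.Str.len p.2 then (p.1, i)
        else p)
      (h, h)

-- ===== PORT B =====
-- B: divide and conquer. Fuel (= initial list length) only makes the recursion
-- structural; for any nonempty input it is never exhausted. nums[:mid]/nums[mid:]
-- are take/drop (exact: 0 ≤ mid ≤ len). len(nums)//2 is Nat division (exact: len ≥ 0).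
def pvSolveB : Nat → List String → String × String
  | 0, _ => ("", "")  -- fuel exhausted: unreachable for nonempty input (Python recurses forever on [])
  | fuel + 1, nums =>
    if nums.length == 1 then (nums.headD "", nums.headD "")
    else
      let mid := nums.length / 2
      let p1 := pvSolveB fuel (nums.take mid)
      let p2 := pvSolveB fuel (nums.drop mid)
      let longest := if PySem.Str.len p1.1 ≥ PySem.Str.len p2.1 then p1.1 else p2.1
      let shortest := if PySem.Str.len p1.2 ≤ PySem.Str.len p2.2 then p1.2 else p2.2
      (longest, shortest)

def longest_shortest_alt (nums : List String) : String × String :=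
  pvSolveB nums.length nums

-- ===== PRECONDITION & SPEC =====
-- A raises IndexError (nums[0]) on the empty list (B's recursion does not return there either).
def Pre_longest_shortest (nums : List String) : Prop := nums ≠ []
instance (nums : List String) : Decidable (Pre_longest_shortest nums) := by unfold Pre_longest_shortest; infer_instance
def pvWitness_longest_shortest : List String := ["ab", "c", "def"]

def Spec_longest_shortest (nums : List String) (out : String × String) : Prop := out = longest_shortest_alt nums
instance (nums : List String) (out : String × String) : Decidable (Spec_longest_shortest nums out) := by unfold Spec_longest_shortest; infer_instance

-- ===== CLAIM (what is proved, stated in full; the proofs are below) =====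
def Claim_equal_longest_shortest : Prop := ∀ (nums : List String), Dom_longest_shortest nums → Pre_longest_shortest nums → Spec_longest_shortest nums (longest_shortest nums)

-- ===== LEMMAS AND PROOFS =====

-- first element of maximal / minimal length, as seeded folds
def pvMaxFold (t : List String) (m : String) : String :=
  t.foldl (fun m x => if PySem.Str.len m < PySem.Str.len x then x else m) m
def pvMinFold (t : List String) (m : String) : String :=
  t.foldl (fun m x => if PySem.Str.len x < PySem.Str.len m then x else m) m

-- A's combined fold splits into the two independent folds, given the invariant len S ≤ len L
theorem foldA_split (t : List String) (L S : String)
    (hinv : PySem.Str.len S ≤ PySem.Str.len L) :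
    t.foldl
      (fun (p : String × String) i =>
        if PySem.Str.len i > PySem.Str.len p.1 then (i, p.2)
        else if PySem.Str.len i < PySem.Str.len p.2 then (p.1, i)
        else p)
      (L, S) = (pvMaxFold t L, pvMinFold t S) := by
  induction t generalizing L S with
  | nil => rfl
  | cons x xs ih =>
    simp only [List.foldl_cons, pvMaxFold, pvMinFold] at *
    by_cases h1 : PySem.Str.len x > PySem.Str.len L
    · have h2 : ¬ PySem.Str.len x < PySem.Str.len S := by omega
      rw [if_pos h1, if_pos (by omega : PySem.Str.len L < PySem.Str.len x), if_neg h2]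
      exact ih x S (by omega)
    · have h3 : ¬ PySem.Str.len L < PySem.Str.len x := by omega
      by_cases h2 : PySem.Str.len x < PySem.Str.len S
      · rw [if_neg h1, if_pos h2, if_neg h3, if_pos h2]
        exact ih L x (by omega)
      · rw [if_neg h1, if_neg h2, if_neg h3, if_neg h2]
        exact ih L S hinv

-- restarting a max fold: the fold from seed m over a nonempty list compares m with the list's own champion
theorem pvMaxFold_restart (b : String) (bs : List String) (m : String) :
    pvMaxFold (b :: bs) m =
      if PySem.Str.len m < PySem.Str.len (pvMaxFold bs b) then pvMaxFold bs b else m := by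
  induction bs generalizing b m with
  | nil =>
    simp only [pvMaxFold, List.foldl_cons, List.foldl_nil]
  | cons c cs ih =>
    have hb : pvMaxFold (c :: cs) b =
        if PySem.Str.len b < PySem.Str.len (pvMaxFold cs c) then pvMaxFold cs c else b := ih c b
    have hm' : pvMaxFold (b :: (c :: cs)) m
        = pvMaxFold (c :: cs) (if PySem.Str.len m < PySem.Str.len b then b else m) := by
      simp only [pvMaxFold, List.foldl_cons]
    rw [hm', ih c _, hb]
    split_ifs <;> first | rfl | omega

theorem pvMinFold_restart (b : String) (bs : List String) (m : String) :
    pvMinFold (b :: bs) m =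
      if PySem.Str.len (pvMinFold bs b) < PySem.Str.len m then pvMinFold bs b else m := by
  induction bs generalizing b m with
  | nil =>
    simp only [pvMinFold, List.foldl_cons, List.foldl_nil]
  | cons c cs ih =>
    have hb : pvMinFold (c :: cs) b =
        if PySem.Str.len (pvMinFold cs c) < PySem.Str.len b then pvMinFold cs c else b := ih c b
    have hm' : pvMinFold (b :: (c :: cs)) m
        = pvMinFold (c :: cs) (if PySem.Str.len b < PySem.Str.len m then b else m) := by
      simp only [pvMinFold, List.foldl_cons]
    rw [hm', ih c _, hb]
    split_ifs <;> first | rfl | omega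

-- the pair B computes on a nonempty list, in terms of the folds
def pvSel (xs : List String) : String × String :=
  match xs with
  | [] => ("", "")
  | h :: t => (pvMaxFold t h, pvMinFold t h)

theorem pvSel_append (as bs : List String) (ha : as ≠ []) (hb : bs ≠ []) :
    pvSel (as ++ bs) =
      ((if PySem.Str.len (pvSel as).1 ≥ PySem.Str.len (pvSel bs).1 then (pvSel as).1 else (pvSel bs).1),
       (if PySem.Str.len (pvSel as).2 ≤ PySem.Str.len (pvSel bs).2 then (pvSel as).2 else (pvSel bs).2)) := by
  match as, bs with
  | a :: as', b :: bs' =>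
    simp only [pvSel, List.cons_append]
    have hmx : pvMaxFold (as' ++ b :: bs') a = pvMaxFold (b :: bs') (pvMaxFold as' a) := by
      simp only [pvMaxFold, List.foldl_append]
    have hmn : pvMinFold (as' ++ b :: bs') a = pvMinFold (b :: bs') (pvMinFold as' a) := by
      simp only [pvMinFold, List.foldl_append]
    rw [hmx, hmn, pvMaxFold_restart, pvMinFold_restart]
    simp only [Prod.mk.injEq]
    constructor <;> (split_ifs <;> first | rfl | omega)

theorem pvSolveB_eq_sel (fuel : Nat) (xs : List String)
    (hne : xs ≠ []) (hfuel : xs.length ≤ fuel) :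
    pvSolveB fuel xs = pvSel xs := by
  induction fuel generalizing xs with
  | zero =>
    have := List.length_pos_iff.mpr hne; omega
  | succ fuel ih =>
    by_cases h1 : xs.length = 1
    · match xs, h1 with
      | [h], _ => simp [pvSolveB, pvSel, pvMaxFold, pvMinFold]
    · have hlen : 2 ≤ xs.length := by
        have := List.length_pos_iff.mpr hne; omega
      have hmid1 : 1 ≤ xs.length / 2 := by omega
      have hmid2 : xs.length / 2 < xs.length := by omega
      have htake : (xs.take (xs.length / 2)).length = xs.length / 2 := by
        simp [List.length_take]; omega
      have hdrop : (xs.drop (xs.length / 2)).length = xs.length - xs.length / 2 := by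
        simp [List.length_drop]
      have htne : xs.take (xs.length / 2) ≠ [] := by
        intro h; rw [h] at htake; simp at htake; omega
      have hdne : xs.drop (xs.length / 2) ≠ [] := by
        intro h; rw [h] at hdrop; simp at hdrop; omega
      have e1 := ih (xs.take (xs.length / 2)) htne (by omega)
      have e2 := ih (xs.drop (xs.length / 2)) hdne (by omega)
      have hcat : xs.take (xs.length / 2) ++ xs.drop (xs.length / 2) = xs :=
        List.take_append_drop _ xs
      simp only [pvSolveB]
      rw [if_neg (by simpa using h1), e1, e2]
      conv_rhs => rw [← hcat]
      rw [pvSel_append _ _ htne hdne]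

-- ===== VERDICT (by name: the statement is the Claim_ definition above) =====
theorem longest_shortest_spec : Claim_equal_longest_shortest := by
  intro nums _ hpre
  unfold Spec_longest_shortest longest_shortest longest_shortest_alt
  match nums with
  | [] => exact absurd rfl hpre
  | h :: t =>
    rw [pvSolveB_eq_sel _ _ (by simp) le_rfl]
    simp only [List.foldl_cons]
    rw [if_neg (by omega : ¬ PySem.Str.len h > PySem.Str.len h),
        if_neg (by omega : ¬ PySem.Str.len h < PySem.Str.len h)]
    rw [foldA_split t h h le_rfl]
    rfl
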